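-- pv_equiv track=rewrite | github.com/peirong26/Brain-ID | utils/checkpoint.py | _group_str
-- ===== SOURCE A (Python) =====
-- def _longest_common_prefix_str(names):
--     m1, m2 = min(names), max(names)
--     lcp = []
--     for a, b in zip(m1, m2):
--         if a == b:
--             lcp.append(a)
--         else:
--             break
--     lcp = "".join(lcp)
--     return lcp
--
-- def _group_str(names):
--     """
--     Turn "common1", "common2", "common3" into "common{1,2,3}"
--     """
--     lcp = _longest_common_prefix_str(names)
--     rest = [x[len(lcp) :] for x in names]
--     rest = "{" + ",".join(rest) + "}"
--     ret = lcp + rest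
--
--     # add some simplification for BN specifically
--     ret = ret.replace("bn_{beta,running_mean,running_var,gamma}", "bn_*")
--     ret = ret.replace("bn_beta,bn_running_mean,bn_running_var,bn_gamma", "bn_*")
--     return ret
-- ===== SOURCE B (Python) =====
-- def _group_str(names):
--     prefix = []
--     for chars in zip(*names):
--         if all(c == chars[0] for c in chars):
--             prefix.append(chars[0])
--         else:
--             break
--     k = len(prefix)
--     ret = "".join(prefix) + "{" + ",".join(x[k:] for x in names) + "}"
--     for pat in ("bn_{beta,running_mean,running_var,gamma}",
--                 "bn_beta,bn_running_mean,bn_running_var,bn_gamma"):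
--         ret = ret.replace(pat, "bn_*")
--     return ret
-- ===== Notes on version B (the rewrite author's own statement) =====
-- stated objective: idiomatic
-- what changed: Replaces the min/max lexicographic LCP trick with a direct column-wise scan over zip(*names) that extends the prefix while every name shares the character, and folds the two bn_* replacements over a tuple of patterns.
-- crash fix: On the empty list A raises ValueError (min() of an empty sequence) while B naturally returns "{}". — e.g. on _group_str([]): A raises ValueError, B returns "{}"
import Mathlib
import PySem

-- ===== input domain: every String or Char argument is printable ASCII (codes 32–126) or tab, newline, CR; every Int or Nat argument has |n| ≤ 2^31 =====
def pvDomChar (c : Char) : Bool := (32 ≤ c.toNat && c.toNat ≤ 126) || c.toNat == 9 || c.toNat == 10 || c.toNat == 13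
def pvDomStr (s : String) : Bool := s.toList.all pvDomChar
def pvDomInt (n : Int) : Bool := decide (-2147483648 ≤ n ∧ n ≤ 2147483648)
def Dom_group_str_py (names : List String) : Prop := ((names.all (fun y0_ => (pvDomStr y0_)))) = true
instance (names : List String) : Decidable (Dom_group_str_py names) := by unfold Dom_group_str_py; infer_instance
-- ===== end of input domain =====

-- B replaces A's min/max lexicographic LCP trick with a column-wise scan over all names
-- (idiomatic, same cost); on [] A raises ValueError while B returns "{}" (see Raises_ block).

-- ===== PORT A =====
-- _longest_common_prefix_str's loop: for a, b in zip(m1, m2): append while equal, break at mismatch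
def pvLcpZip : List Char → List Char → List Char
  | a :: as, b :: bs => if a = b then a :: pvLcpZip as bs else []
  | _, _ => []

def group_str_py (names : List String) : String :=
  match PySem.List.min? names (fun x => x), PySem.List.max? names (fun x => x) with
  | some m1, some m2 =>
    let lcp := pvLcpZip m1.toList m2.toList
    let rest := names.map (fun x => x.toList.drop lcp.length)  -- x[len(lcp):]
    let ret := lcp ++ ('{' :: PySem.Chars.join [','] rest ++ ['}'])
    let ret := PySem.Chars.replace ret "bn_{beta,running_mean,running_var,gamma}".toList "bn_*".toList
    let ret := PySem.Chars.replace ret "bn_beta,bn_running_mean,bn_running_var,bn_gamma".toList "bn_*".toList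
    String.ofList ret
  | _, _ => ""  -- unreachable under Pre_: min()/max() of [] raises ValueError

-- ===== PORT B =====
-- the `for chars in zip(*names)` column scan: first name drives the columns,
-- a column is kept while every other name still has that same character
def pvColScan : List Char → List (List Char) → List Char
  | [], _ => []
  | c :: cs, ls =>
    if ls.all (fun t => t.head? == some c) then c :: pvColScan cs (ls.map List.tail)
    else []

def group_str_py_alt (names : List String) : String :=
  let pre : List Char :=
    match names with
    | [] => []
    | n :: ns => pvColScan n.toList (ns.map String.toList)
  let k := pre.length
  let ret := pre ++ ('{' :: PySem.Chars.join [','] (names.map (fun x => x.toList.drop k)) ++ ['}'])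
  let ret := ["bn_{beta,running_mean,running_var,gamma}",
              "bn_beta,bn_running_mean,bn_running_var,bn_gamma"].foldl
      (fun r pat => PySem.Chars.replace r pat.toList "bn_*".toList) ret
  String.ofList ret

-- ===== PRECONDITION & SPEC =====
-- A raises ValueError on the empty list (min() of an empty sequence); excluded here.
def Pre_group_str_py (names : List String) : Prop := names ≠ []
instance (names : List String) : Decidable (Pre_group_str_py names) := by unfold Pre_group_str_py; infer_instance
def pvWitness_group_str_py : List String := ["conv1_w", "conv1_b"]

-- On the empty list A raises ValueError (min() of an empty sequence) while B naturally returns "{}".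
def Raises_group_str_py (names : List String) : Prop := names = []
instance (names : List String) : Decidable (Raises_group_str_py names) := by unfold Raises_group_str_py; infer_instance
def pvRaiseWitness_group_str_py : List String := []
def pvRaiseWitnessOut_group_str_py : String := "{}"

def Spec_group_str_py (names : List String) (out : String) : Prop := out = group_str_py_alt names
instance (names : List String) (out : String) : Decidable (Spec_group_str_py names out) := by unfold Spec_group_str_py; infer_instance

-- ===== CLAIM (what is proved, stated in full; the proofs are below) =====
def Claim_equal_group_str_py : Prop := ∀ (names : List String), Dom_group_str_py names → Pre_group_str_py names → Spec_group_str_py names (group_str_py names)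
def Claim_raises_group_str_py : Prop := (∀ (names : List String), Dom_group_str_py names → Raises_group_str_py names → ¬ Pre_group_str_py names) ∧ (Dom_group_str_py (pvRaiseWitness_group_str_py) ∧ Raises_group_str_py (pvRaiseWitness_group_str_py) ∧ group_str_py_alt (pvRaiseWitness_group_str_py) = pvRaiseWitnessOut_group_str_py)

-- ===== LEMMAS AND PROOFS =====

-- pvColScan yields a common prefix of all the names
theorem pvColScan_prefix (l : List Char) :
    ∀ ls : List (List Char), pvColScan l ls <+: l ∧ ∀ t ∈ ls, pvColScan l ls <+: t := by
  induction l with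
  | nil => intro ls; simp [pvColScan]
  | cons c cs ih =>
    intro ls
    by_cases h : ls.all (fun t => t.head? == some c)
    · simp only [pvColScan, h, if_pos]
      obtain ⟨ih1, ih2⟩ := ih (ls.map List.tail)
      refine ⟨List.cons_prefix_cons.2 ⟨rfl, ih1⟩, ?_⟩
      intro t ht
      have hh : t.head? = some c := by
        have := List.all_eq_true.1 h t ht
        simpa using this
      cases t with
      | nil => simp at hh
      | cons d ds =>
        obtain rfl : d = c := by simpa using hh
        exact List.cons_prefix_cons.2 ⟨rfl, ih2 ds (by simpa using List.mem_map_of_mem ht)⟩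
    · simp [pvColScan, h]

-- any common prefix of all names is a prefix of pvColScan
theorem pvColScan_max (p : List Char) :
    ∀ l ls, p <+: l → (∀ t ∈ ls, p <+: t) → p <+: pvColScan l ls := by
  induction p with
  | nil => intro l ls _ _; exact List.nil_prefix
  | cons c ps ih =>
    intro l ls hl hls
    cases l with
    | nil => exact absurd hl.length_le (by simp)
    | cons d ds =>
      obtain ⟨rfl, hps⟩ := List.cons_prefix_cons.1 hl
      have hall : ls.all (fun t => t.head? == some c) = true := by
        refine List.all_eq_true.2 fun t ht => ?_
        cases t with
        | nil => exact absurd (hls _ ht).length_le (by simp)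
        | cons e es => obtain ⟨rfl, _⟩ := List.cons_prefix_cons.1 (hls _ ht); simp
      simp only [pvColScan, hall, if_pos]
      refine List.cons_prefix_cons.2 ⟨rfl, ih ds (ls.map List.tail) hps ?_⟩
      intro t' ht'
      obtain ⟨t, ht, rfl⟩ := List.mem_map.1 ht'
      cases t with
      | nil => exact absurd (hls _ ht).length_le (by simp)
      | cons e es => obtain ⟨rfl, h2⟩ := List.cons_prefix_cons.1 (hls _ ht); exact h2

-- a common prefix of both arguments is a prefix of pvLcpZip
theorem pvLcpZip_max (p : List Char) :
    ∀ a b, p <+: a → p <+: b → p <+: pvLcpZip a b := by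
  induction p with
  | nil => intro a b _ _; exact List.nil_prefix
  | cons c ps ih =>
    intro a b ha hb
    cases a with
    | nil => exact absurd ha.length_le (by simp)
    | cons d ds =>
      cases b with
      | nil => exact absurd hb.length_le (by simp)
      | cons e es =>
        obtain ⟨rfl, ha'⟩ := List.cons_prefix_cons.1 ha
        obtain ⟨rfl, hb'⟩ := List.cons_prefix_cons.1 hb
        simp only [pvLcpZip]
        exact List.cons_prefix_cons.2 ⟨rfl, ih ds es ha' hb'⟩

-- the order-squeeze fact behind A's trick: if a ≤ x ≤ b lexicographically,
-- the zip-lcp of a and b is a prefix of x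
theorem pvLcpZip_between :
    ∀ a b x : List Char, ¬ List.Lex (· < ·) x a → ¬ List.Lex (· < ·) b x →
      pvLcpZip a b <+: x := by
  intro a
  induction a with
  | nil => intro b x _ _; simp [pvLcpZip]
  | cons c as ih =>
    intro b x hxa hbx
    cases b with
    | nil => simp [pvLcpZip]
    | cons d bs =>
      by_cases hcd : c = d
      · subst hcd
        cases x with
        | nil => exact absurd List.Lex.nil hxa
        | cons e xs =>
          have h1 : ¬ e < c := fun h => hxa (List.cons_lex_cons_iff.2 (Or.inl h))
          have h2 : ¬ c < e := fun h => hbx (List.cons_lex_cons_iff.2 (Or.inl h))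
          obtain rfl : e = c := le_antisymm (not_lt.1 h2) (not_lt.1 h1)
          have h1' : ¬ List.Lex (· < ·) xs as := fun h => hxa (List.cons_lex_cons_iff.2 (Or.inr ⟨rfl, h⟩))
          have h2' : ¬ List.Lex (· < ·) bs xs := fun h => hbx (List.cons_lex_cons_iff.2 (Or.inr ⟨rfl, h⟩))
          simp only [pvLcpZip]
          exact List.cons_prefix_cons.2 ⟨rfl, ih bs xs h1' h2'⟩
      · simp [pvLcpZip, hcd]

-- the two prefix computations agree on a nonempty list of names
theorem pv_lcp_eq (n : String) (ns : List String) {m1 m2 : String}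
    (hm1 : PySem.List.min? (n :: ns) (fun x => x) = some m1)
    (hm2 : PySem.List.max? (n :: ns) (fun x => x) = some m2) :
    pvLcpZip m1.toList m2.toList = pvColScan n.toList (ns.map String.toList) := by
  have hmem : ∀ s : String, s ∈ n :: ns → s.toList ∈ n.toList :: ns.map String.toList := by
    intro s hs
    rcases List.mem_cons.1 hs with rfl | hs'
    · exact List.mem_cons_self
    · exact List.mem_cons_of_mem _ (List.mem_map_of_mem hs')
  -- ≤ : the zip-lcp of min and max is a common prefix of every name
  have hfwd : ∀ s : String, s ∈ n :: ns → pvLcpZip m1.toList m2.toList <+: s.toList := by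
    intro s hs
    have hlo : m1 ≤ s := PySem.List.min?_isMin hm1 s hs
    have hhi : s ≤ m2 := PySem.List.max?_isMax hm2 s hs
    exact pvLcpZip_between m1.toList m2.toList s.toList
      (fun h => absurd (String.lt_iff_toList_lt.2 h) (not_lt.2 hlo))
      (fun h => absurd (String.lt_iff_toList_lt.2 h) (not_lt.2 hhi))
  have h1 : pvLcpZip m1.toList m2.toList <+: pvColScan n.toList (ns.map String.toList) := by
    refine pvColScan_max _ _ _ (hfwd n List.mem_cons_self) ?_
    intro t ht
    obtain ⟨s, hs, rfl⟩ := List.mem_map.1 ht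
    exact hfwd s (List.mem_cons_of_mem _ hs)
  -- ≥ : the column scan is a common prefix, in particular of min and max
  have hcs := pvColScan_prefix n.toList (ns.map String.toList)
  have hpre : ∀ s : String, s ∈ n :: ns → pvColScan n.toList (ns.map String.toList) <+: s.toList := by
    intro s hs
    rcases List.mem_cons.1 (hmem s hs) with h | h
    · rw [h]; exact hcs.1
    · exact hcs.2 _ h
  have h2 : pvColScan n.toList (ns.map String.toList) <+: pvLcpZip m1.toList m2.toList :=
    pvLcpZip_max _ _ _ (hpre m1 (PySem.List.min?_mem hm1)) (hpre m2 (PySem.List.max?_mem hm2))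
  exact h1.eq_of_length_le h2.length_le

-- ===== VERDICT (by name: the statement is the Claim_ definition above) =====
theorem group_str_py_spec : Claim_equal_group_str_py := by
  intro names _ hpre
  unfold Spec_group_str_py
  obtain ⟨n, ns, rfl⟩ := List.exists_cons_of_ne_nil hpre
  obtain ⟨m1, hm1⟩ : ∃ m1, PySem.List.min? (n :: ns) (fun x => x) = some m1 := by
    cases h : PySem.List.min? (n :: ns) (fun x => x) with
    | none => simp [PySem.List.min?_eq_none_iff] at h
    | some m => exact ⟨m, rfl⟩
  obtain ⟨m2, hm2⟩ : ∃ m2, PySem.List.max? (n :: ns) (fun x => x) = some m2 := by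
    cases h : PySem.List.max? (n :: ns) (fun x => x) with
    | none => simp [PySem.List.max?_eq_none_iff] at h
    | some m => exact ⟨m, rfl⟩
  simp only [group_str_py, group_str_py_alt, hm1, hm2, List.foldl]
  rw [pv_lcp_eq n ns hm1 hm2]

theorem group_str_py_raises : Claim_raises_group_str_py := by
  unfold Claim_raises_group_str_py
  exact ⟨fun names _ h => by simp [Raises_group_str_py] at h; simp [h, Pre_group_str_py], by decide⟩

-- self-check: the raise witness indeed lies inside Raises_ and B's port returns the stated literal there
theorem pvRaiseWitness_group_str_py_ok :
    Raises_group_str_py pvRaiseWitness_group_str_py ∧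
      group_str_py_alt pvRaiseWitness_group_str_py = pvRaiseWitnessOut_group_str_py :=
  ⟨group_str_py_raises.2.2.1, group_str_py_raises.2.2.2⟩
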